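-- pv_equiv track=rewrite | github.com/enels/solutions_to_prog_problems | dsa_in_python/chapter4/creativity/cr_4.18_solution.py | has_vowel_than_consonant
-- ===== SOURCE A (Python) =====
-- def has_vowel_than_consonant(s, next_char_index=0, vowel_count=0):
--     """
--     checks if a string has more vowels than consonants
--     :param s: string to check
--     :param next_char_index: next character in string
--     :param vowel_count: number of vowel
--     :return: True if vowel > consonant, False otherwise
--     """
--
--     vowels = ['a', 'e', 'i', 'o', 'u']
--
--     # base case
--     if next_char_index == len(s):
--         if vowel_count > len(s) - vowel_count:
--             return True
--         else:
--             return False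
--
--     # recursive circle
--     # if character is a vowel
--     if s[next_char_index].lower() in vowels:
--         # recurse with an increment in numbegr of vowels
--         return has_vowel_than_consonant(s, next_char_index + 1, vowel_count + 1)
--     # if character is a consonant
--     else:
--         # recurse with number of vowels remain the same
--         return has_vowel_than_consonant(s, next_char_index + 1, vowel_count)
-- ===== SOURCE B (Python) =====
-- def has_vowel_than_consonant(s, next_char_index=0, vowel_count=0):
--     """
--     checks if a string has more vowels than consonants
--     (single pass over the remaining indices instead of recursion)
--     """
--     total = vowel_count + sum(
--         1 for i in range(next_char_index, len(s)) if s[i].lower() in ('a', 'e', 'i', 'o', 'u')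
--     )
--     return total > len(s) - total
-- ===== Notes on version B (the rewrite author's own statement) =====
-- stated objective: simpler
-- what changed: Replaced the tail recursion that threads an accumulator through call frames with a single generator-sum over range(next_char_index, len(s)) followed by one comparison.
import Mathlib
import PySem

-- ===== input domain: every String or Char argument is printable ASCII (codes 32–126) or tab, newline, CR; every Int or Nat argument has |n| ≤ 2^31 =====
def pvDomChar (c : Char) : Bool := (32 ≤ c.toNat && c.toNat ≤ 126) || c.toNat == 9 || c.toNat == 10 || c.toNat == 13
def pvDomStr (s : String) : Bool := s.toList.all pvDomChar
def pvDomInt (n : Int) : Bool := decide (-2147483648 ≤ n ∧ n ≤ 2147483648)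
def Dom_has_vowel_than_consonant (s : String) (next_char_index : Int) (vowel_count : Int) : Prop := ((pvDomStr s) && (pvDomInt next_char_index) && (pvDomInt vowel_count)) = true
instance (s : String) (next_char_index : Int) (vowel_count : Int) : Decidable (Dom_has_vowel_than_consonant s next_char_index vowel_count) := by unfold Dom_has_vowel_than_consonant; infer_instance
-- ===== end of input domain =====

-- B replaces A's accumulator recursion by a single count over the remaining indices plus one comparison (objective: simpler).

-- ===== PORT A =====
def pvVowelsA : List Char := ['a', 'e', 'i', 'o', 'u']

-- the recursion of A; `none` from pyGet? is where Python raises IndexError (excluded by Pre_)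
def pvGoA (l : List Char) (idx vc : Int) : Bool :=
  if idx = (l.length : Int) then
    if vc > (l.length : Int) - vc then true else false
  else
    match h : PySem.List.pyGet? l idx with
    | none => false
    | some c =>
      if PySem.Chars.lowerChar c ∈ pvVowelsA then pvGoA l (idx + 1) (vc + 1)
      else pvGoA l (idx + 1) vc
termination_by ((l.length : Int) - idx).toNat
decreasing_by
  all_goals
    have hin : PySem.Raise.InRange l.length idx := by
      by_contra hc
      rw [← PySem.List.pyGet?_eq_none_iff] at hc
      simp [h] at hc
    simp [PySem.Raise.InRange] at hin
    omega

def has_vowel_than_consonant (s : String) (next_char_index : Int) (vowel_count : Int) : Bool :=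
  pvGoA s.toList next_char_index vowel_count

-- ===== PORT B =====
def pvIsVowelB (c : Char) : Bool := PySem.Chars.lowerChar c ∈ ['a', 'e', 'i', 'o', 'u']

def has_vowel_than_consonant_alt (s : String) (next_char_index : Int) (vowel_count : Int) : Bool :=
  let l := s.toList
  let total : Int := vowel_count +
    ((PySem.List.pyRange next_char_index (l.length : Int)).countP
      (fun i => (PySem.List.pyGet? l i).any pvIsVowelB) : Nat)
  decide (total > (l.length : Int) - total)

-- ===== PRECONDITION & SPEC =====
-- Pre_ excludes exactly the inputs where Python A raises IndexError: next_char_index beyond ±len(s).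
def Pre_has_vowel_than_consonant (s : String) (next_char_index : Int) (vowel_count : Int) : Prop :=
  -(s.toList.length : Int) ≤ next_char_index ∧ next_char_index ≤ (s.toList.length : Int)
instance (s : String) (next_char_index : Int) (vowel_count : Int) : Decidable (Pre_has_vowel_than_consonant s next_char_index vowel_count) := by unfold Pre_has_vowel_than_consonant; infer_instance

def pvWitness_has_vowel_than_consonant : String × Int × Int := ("rain", 0, 0)

def Spec_has_vowel_than_consonant (s : String) (next_char_index : Int) (vowel_count : Int) (out : Bool) : Prop := out = has_vowel_than_consonant_alt s next_char_index vowel_count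
instance (s : String) (next_char_index : Int) (vowel_count : Int) (out : Bool) : Decidable (Spec_has_vowel_than_consonant s next_char_index vowel_count out) := by unfold Spec_has_vowel_than_consonant; infer_instance

-- ===== CLAIM (what is proved, stated in full; the proofs are below) =====
def Claim_equal_has_vowel_than_consonant : Prop := ∀ (s : String) (next_char_index : Int) (vowel_count : Int), Dom_has_vowel_than_consonant s next_char_index vowel_count → Pre_has_vowel_than_consonant s next_char_index vowel_count → Spec_has_vowel_than_consonant s next_char_index vowel_count (has_vowel_than_consonant s next_char_index vowel_count)


-- ===== LEMMAS AND PROOFS =====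
-- B's count of vowels at indices [idx, len)
def pvCountB (l : List Char) (idx : Int) : Int :=
  ((PySem.List.pyRange idx (l.length : Int)).countP
    (fun i => (PySem.List.pyGet? l i).any pvIsVowelB) : Nat)

lemma pvGoA_eq (l : List Char) :
    ∀ (n : Nat) (idx vc : Int), ((l.length : Int) - idx).toNat ≤ n →
      -(l.length : Int) ≤ idx → idx ≤ (l.length : Int) →
      pvGoA l idx vc = decide (vc + pvCountB l idx > (l.length : Int) - (vc + pvCountB l idx)) := by
  intro n
  induction n with
  | zero =>
    intro idx vc hn h1 h2
    have hidx : idx = (l.length : Int) := by omega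
    subst hidx
    rw [pvGoA]
    simp [pvCountB, PySem.List.pyRange_one_eq_nil le_rfl]
  | succ n ih =>
    intro idx vc hn h1 h2
    rcases eq_or_lt_of_le h2 with heq | hlt
    · subst heq
      rw [pvGoA]
      simp [pvCountB, PySem.List.pyRange_one_eq_nil le_rfl]
    · have hin : PySem.Raise.InRange l.length idx := ⟨h1, hlt⟩
      obtain ⟨c, hget⟩ : ∃ c, PySem.List.pyGet? l idx = some c := by
        cases hg : PySem.List.pyGet? l idx with
        | none => exact absurd hin ((PySem.List.pyGet?_eq_none_iff l idx).mp hg)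
        | some c => exact ⟨c, rfl⟩
      have hcount : pvCountB l idx
          = (if pvIsVowelB c then 1 else 0) + pvCountB l (idx + 1) := by
        unfold pvCountB
        rw [PySem.List.pyRange_one_cons hlt, List.countP_cons, hget]
        simp [Option.any]
        split_ifs <;> push_cast <;> ring
      rw [pvGoA]
      rw [if_neg (by omega)]
      rw [hget]
      simp only []
      by_cases hv : pvIsVowelB c
      · have hmem : PySem.Chars.lowerChar c ∈ pvVowelsA := by
          simpa [pvIsVowelB, pvVowelsA] using hv
        rw [if_pos hmem, ih (idx + 1) (vc + 1) (by omega) (by omega) (by omega)]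
        rw [hcount, if_pos hv]
        congr 2 <;> ring
      · have hmem : PySem.Chars.lowerChar c ∉ pvVowelsA := by
          simpa [pvIsVowelB, pvVowelsA] using hv
        rw [if_neg hmem, ih (idx + 1) vc (by omega) (by omega) (by omega)]
        rw [hcount, if_neg hv]
        congr 2 <;> ring

-- ===== VERDICT (by name: the statement is the Claim_ definition above) =====
theorem has_vowel_than_consonant_spec : Claim_equal_has_vowel_than_consonant := by
  intro s nci vc _ hpre
  unfold Spec_has_vowel_than_consonant has_vowel_than_consonant has_vowel_than_consonant_alt
  rw [pvGoA_eq s.toList (((s.toList.length : Int) - nci).toNat) nci vc le_rfl hpre.1 hpre.2]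
  rfl
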